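-- pv_equiv track=rewrite | github.com/SudoSuOps/Swarm-Jelly | validate_swarmjelly.py | _is_degenerate
-- ===== SOURCE A (Python) =====
-- def _is_degenerate(text: str) -> bool:
--     """Check for 40+ char substring repeated 3+ times without regex backtracking."""
--     if len(text) < 120:
--         return False
--     # Sample 200-char windows, check for repeat patterns
--     for start in range(0, min(len(text) - 120, 5000), 200):
--         chunk = text[start:start + 200]
--         for size in range(40, min(len(chunk) // 3, 80)):
--             substr = chunk[:size]
--             if chunk.count(substr) >= 3:
--                 return True
--     return False
-- ===== SOURCE B (Python) =====
-- def _is_degenerate(text: str) -> bool: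
--     """A sampled 200-char window is degenerate when it contains its own
--     40-char prefix three or more times (non-overlapping count); scan the
--     windows with a while loop, one count test per window."""
--     if len(text) < 120:
--         return False
--     limit = min(len(text) - 120, 5000)
--     start = 0
--     while start < limit:
--         chunk = text[start:start + 200]
--         if chunk.count(chunk[:40]) >= 3:
--             return True
--         start += 200
--     return False
-- ===== Notes on version B (the rewrite author's own statement) =====
-- stated objective: simpler
-- what changed: A's inner loop over pattern sizes 40..min(len(chunk)//3,80) is replaced by a single size-40 count test per window (the non-overlapping count is non-increasing as the pattern is extended, so size 40 decides the whole loop), and the window scan becomes a plain while loop.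
-- intended difference: On texts whose only window containing its 40-char prefix 3+ times is a trailing window shorter than 123 chars, A returns False (range(40, len(chunk)//3) is empty there even though three 40-char copies fit) while B returns True; the chunk really does contain a 40+ char substring repeated 3 times, so True is the intended answer. — e.g. on _is_degenerate("aaaaaaaaaaaaaaaaaaaaaaaaaaaaaaaaaaaaaaaaaaaaaaaaaaaaaaaaaaaaaaaaaaaaaaaaaaaaaaaaaaaaaaaaaaaaaaaaaaaaaaaaaaaaaaaaaaaaaa…): A returns false, B returns true
import Mathlib
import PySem

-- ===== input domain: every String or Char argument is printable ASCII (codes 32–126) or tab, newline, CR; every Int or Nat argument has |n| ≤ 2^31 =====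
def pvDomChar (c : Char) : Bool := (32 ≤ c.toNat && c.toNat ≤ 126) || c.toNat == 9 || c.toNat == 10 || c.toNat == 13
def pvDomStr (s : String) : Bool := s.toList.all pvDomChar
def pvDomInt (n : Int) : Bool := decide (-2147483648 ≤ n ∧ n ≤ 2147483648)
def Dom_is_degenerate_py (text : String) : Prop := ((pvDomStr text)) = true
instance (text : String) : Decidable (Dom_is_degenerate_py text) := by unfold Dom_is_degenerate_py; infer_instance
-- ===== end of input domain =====

-- B scans the sampled windows with one size-40 count test each (the non-overlapping count is
-- non-increasing as the pattern is extended, so size 40 decides A's whole inner size loop);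
-- on short trailing windows (< 123 chars) A's size loop is empty and A misses a real repeat (see D_).

-- ===== PORT A =====
def is_degenerate_py (text : String) : Bool :=
  if PySem.Str.len text < 120 then false
  else
    (PySem.List.pyRange 0 (min (PySem.Str.len text - 120) 5000) 200).any (fun start =>
      let chunk := PySem.Str.slice text (some start) (some (start + 200))
      (PySem.List.pyRange 40 (min (PySem.Int.floordiv (PySem.Str.len chunk) 3) 80) 1).any (fun size =>
        let substr := PySem.Str.slice chunk none (some size)
        decide (3 ≤ PySem.Str.count chunk substr)))

-- ===== PORT B =====
-- the while loop of Source B: advance start by 200 until it reaches limit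
-- (fuel only bounds the iteration count so the recursion is structural; it is never exhausted)
def bWindowLoop (text : String) (limit : Int) : Nat → Int → Bool
  | 0, _ => false
  | fuel + 1, start =>
    if start < limit then
      let chunk := PySem.Str.slice text (some start) (some (start + 200))
      if 3 ≤ PySem.Str.count chunk (PySem.Str.slice chunk none (some 40)) then true
      else bWindowLoop text limit fuel (start + 200)
    else false

def is_degenerate_py_alt (text : String) : Bool :=
  if PySem.Str.len text < 120 then false
  else
    let limit := min (PySem.Str.len text - 120) 5000
    bWindowLoop text limit limit.toNat 0

-- ===== PRECONDITION & SPEC =====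
-- pvHit c: the window c contains its own 40-char prefix 3+ times (non-overlapping),
-- i.e. a 40-char substring repeated 3+ times starting at the window's first character.
abbrev pvHit (c : List Char) : Prop := 3 ≤ PySem.Chars.count (c.take 200) (c.take 40)

-- A returns False on texts whose only sampled window containing a 40-char substring repeated
-- 3+ times is the trailing window of length 121 or 122 (range(40, len(chunk)//3) is empty there
-- even though three 40-char copies fit); B returns True, which matches the stated purpose.
def D_is_degenerate_py (text : String) : Prop :=
  text.toList.length % 200 ∈ [121, 122] ∧ text.toList.length < 5000 ∧
  ∀ k ≤ text.toList.length / 200,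
    (pvHit (text.toList.drop (200 * k)) ↔ k = text.toList.length / 200)
instance (text : String) : Decidable (D_is_degenerate_py text) := by unfold D_is_degenerate_py; infer_instance

def Spec_is_degenerate_py (text : String) (out : Bool) : Prop := ¬ D_is_degenerate_py text → out = is_degenerate_py_alt text
instance (text : String) (out : Bool) : Decidable (Spec_is_degenerate_py text out) := by unfold Spec_is_degenerate_py; infer_instance

def pvDiffWitness_is_degenerate_py : String := "aaaaaaaaaaaaaaaaaaaaaaaaaaaaaaaaaaaaaaaaaaaaaaaaaaaaaaaaaaaaaaaaaaaaaaaaaaaaaaaaaaaaaaaaaaaaaaaaaaaaaaaaaaaaaaaaaaaaaaaaa"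
def pvDiffWitnessOut_is_degenerate_py : Bool × Bool := (false, true)

-- ===== CLAIM (what is proved, stated in full; the proofs are below) =====
def Claim_unchanged_is_degenerate_py : Prop := ∀ (text : String), Dom_is_degenerate_py text → Spec_is_degenerate_py text (is_degenerate_py text)
def Claim_changed_is_degenerate_py : Prop := Dom_is_degenerate_py (pvDiffWitness_is_degenerate_py) ∧ D_is_degenerate_py (pvDiffWitness_is_degenerate_py) ∧ is_degenerate_py (pvDiffWitness_is_degenerate_py) = pvDiffWitnessOut_is_degenerate_py.1 ∧ is_degenerate_py_alt (pvDiffWitness_is_degenerate_py) = pvDiffWitnessOut_is_degenerate_py.2 ∧ pvDiffWitnessOut_is_degenerate_py.1 ≠ pvDiffWitnessOut_is_degenerate_py.2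
def Claim_exact_is_degenerate_py : Prop := ∀ (text : String), Dom_is_degenerate_py text → D_is_degenerate_py text → is_degenerate_py text ≠ is_degenerate_py_alt text

-- ===== LEMMAS AND PROOFS =====

-- Fuel-free reformulation of Python's greedy non-overlapping substring count
-- (for a nonempty pattern; the pattern-empty branch of PySem.Chars.count is never taken here).
def gCount (sub : List Char) : List Char → Nat
  | [] => 0
  | c :: t =>
    if h : sub.isPrefixOf (c :: t) = true ∧ sub ≠ [] then gCount sub ((c :: t).drop sub.length) + 1
    else gCount sub t
termination_by s => s.length
decreasing_by
  · simp only [List.length_drop, List.length_cons]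
    have : 0 < sub.length := List.length_pos_of_ne_nil h.2
    omega
  · simp

theorem gCount_nil (p : List Char) : gCount p [] = 0 := by rw [gCount]

theorem gCount_pos (p : List Char) (hp : p ≠ []) {c : Char} {t : List Char}
    (h : p.isPrefixOf (c :: t) = true) :
    gCount p (c :: t) = gCount p ((c :: t).drop p.length) + 1 := by
  rw [gCount]; simp [h, hp]

theorem gCount_neg (p : List Char) {c : Char} {t : List Char}
    (h : ¬ p.isPrefixOf (c :: t) = true) :
    gCount p (c :: t) = gCount p t := by
  rw [gCount]; simp [h]

theorem go_eq_gCount (sub : List Char) (hs : sub ≠ []) :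
    ∀ (fuel : Nat) (s : List Char) (acc : Nat), s.length ≤ fuel →
      PySem.Chars.count.go sub fuel s acc = acc + gCount sub s := by
  intro fuel
  induction fuel with
  | zero =>
    intro s acc hle
    have : s = [] := List.length_eq_zero_iff.mp (Nat.le_zero.mp hle)
    subst this; simp [PySem.Chars.count.go, gCount_nil]
  | succ f ih =>
    intro s acc hle
    match s with
    | [] => simp [PySem.Chars.count.go, gCount_nil]
    | c :: t =>
      by_cases hpre : sub.isPrefixOf (c :: t) = true
      · have hlen : sub.length ≤ t.length + 1 := by
          have := (List.isPrefixOf_iff_prefix.mp hpre).length_le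
          simpa using this
        have hsub : 0 < sub.length := List.length_pos_of_ne_nil hs
        rw [show PySem.Chars.count.go sub (f + 1) (c :: t) acc =
              PySem.Chars.count.go sub f (List.drop sub.length (c :: t)) (acc + 1) by
            simp [PySem.Chars.count.go, hpre]]
        rw [ih _ _ (by simp at hle ⊢; omega)]
        rw [gCount_pos sub hs hpre]
        omega
      · rw [show PySem.Chars.count.go sub (f + 1) (c :: t) acc =
              PySem.Chars.count.go sub f t acc by
            simp [PySem.Chars.count.go, hpre]]
        rw [ih _ _ (by simp at hle ⊢; omega)]
        rw [gCount_neg sub hpre]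

theorem count_eq_gCount (s sub : List Char) (hs : sub ≠ []) :
    PySem.Chars.count s sub = gCount sub s := by
  unfold PySem.Chars.count
  rw [if_neg (by simpa using hs), go_eq_gCount sub hs s.length s 0 le_rfl]
  omega

-- a suffix equals the drop at the length difference
theorem suffix_eq_drop {α : Type} {u v : List α} (h : u <:+ v) :
    u = v.drop (v.length - u.length) := by
  obtain ⟨w, rfl⟩ := h
  simp

-- G and C by simultaneous strong induction on |s|:
--   G: gCount is monotone under passing to a suffix of the text
--   C: dropping at most |p| characters loses at most one occurrence
theorem gCount_GC (p : List Char) (hp : p ≠ []) :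
    ∀ n (s : List Char), s.length = n →
      ((∀ s', s' <:+ s → gCount p s' ≤ gCount p s) ∧
       (∀ j : Nat, j ≤ p.length → gCount p s ≤ 1 + gCount p (s.drop j))) := by
  intro n
  induction n using Nat.strong_induction_on with
  | _ n ih =>
    intro s hs
    have hplen : 0 < p.length := List.length_pos_of_ne_nil hp
    constructor
    · intro s' hsuf
      match s, hs with
      | [], hs =>
        have : s' = [] := List.suffix_nil.mp hsuf
        subst this; exact le_rfl
      | c :: t, hs =>
        rcases List.suffix_cons_iff.mp hsuf with rfl | hsuf'
        · exact le_rfl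
        · by_cases hpre : p.isPrefixOf (c :: t) = true
          · have hple : p.length ≤ t.length + 1 := by
              have := (List.isPrefixOf_iff_prefix.mp hpre).length_le
              simpa using this
            have hdroplen : ((c :: t).drop p.length).length < (c :: t).length := by
              simp only [List.length_drop, List.length_cons]; omega
            rw [gCount_pos p hp hpre]
            by_cases hsmall : s'.length ≤ ((c :: t).drop p.length).length
            · have h1 : s' <:+ (c :: t).drop p.length :=
                List.suffix_of_suffix_length_le hsuf (List.drop_suffix _ _) hsmall
              have h2 := (ih _ (hs ▸ hdroplen) _ rfl).1 s' h1
              omega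
            · have hs'len : s'.length ≤ t.length := hsuf'.length_le
              have h1 : (c :: t).drop p.length <:+ s' :=
                List.suffix_of_suffix_length_le (List.drop_suffix _ _) hsuf (by omega)
              have h2 := suffix_eq_drop h1
              set j := s'.length - ((c :: t).drop p.length).length with hj
              have hjle : j ≤ p.length := by
                simp only [List.length_drop, List.length_cons] at hj ⊢; omega
              have hC := (ih s'.length (by simp only [← hs, List.length_cons]; omega) s' rfl).2 j hjle
              rw [← h2] at hC
              omega
          · rw [gCount_neg p hpre]
            exact (ih t.length (by simp [← hs]) t rfl).1 s' hsuf'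
    · intro j hjle
      rcases Nat.eq_zero_or_pos j with rfl | hjpos
      · simp
      match s, hs with
      | [], hs => simp [gCount_nil]
      | c :: t, hs =>
        by_cases hpre : p.isPrefixOf (c :: t) = true
        · rw [gCount_pos p hp hpre]
          have h1 : (c :: t).drop p.length <:+ (c :: t).drop j := by
            rw [show (c :: t).drop p.length = ((c :: t).drop j).drop (p.length - j) from by
              rw [List.drop_drop]; congr 1; omega]
            exact List.drop_suffix _ _
          have hlen : ((c :: t).drop j).length < (c :: t).length := by
            simp only [List.length_drop, List.length_cons]; omega
          have h2 := (ih _ (hs ▸ hlen) _ rfl).1 _ h1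
          omega
        · rw [gCount_neg p hpre]
          have hstep : (c :: t).drop j = t.drop (j - 1) := by
            rw [show j = (j - 1) + 1 from by omega]; simp
          have h2 := (ih t.length (by simp [← hs]) t rfl).2 (j - 1) (by omega)
          rw [hstep]
          omega

theorem gCount_suffix_le (p : List Char) (hp : p ≠ []) {s s' : List Char} (h : s' <:+ s) :
    gCount p s' ≤ gCount p s :=
  (gCount_GC p hp s.length s rfl).1 s' h

theorem gCount_drop_le (p : List Char) (hp : p ≠ []) (s : List Char) {j : Nat}
    (hj : j ≤ p.length) : gCount p s ≤ 1 + gCount p (s.drop j) :=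
  (gCount_GC p hp s.length s rfl).2 j hj

-- main monotonicity: extending the pattern cannot increase the greedy count
theorem gCount_mono (p q : List Char) (hp : p ≠ []) (hpq : p <+: q) :
    ∀ n (s : List Char), s.length = n → gCount q s ≤ gCount p s := by
  have hq : q ≠ [] := by
    intro h; subst h; exact hp (List.prefix_nil.mp hpq)
  have hplen : 0 < p.length := List.length_pos_of_ne_nil hp
  intro n
  induction n using Nat.strong_induction_on with
  | _ n ih =>
    intro s hs
    match s, hs with
    | [], hs => simp [gCount_nil]
    | c :: t, hs =>
      by_cases hqpre : q.isPrefixOf (c :: t) = true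
      · have hq' := List.isPrefixOf_iff_prefix.mp hqpre
        have hppre : p.isPrefixOf (c :: t) = true :=
          List.isPrefixOf_iff_prefix.mpr (hpq.trans hq')
        rw [gCount_pos q hq hqpre, gCount_pos p hp hppre]
        have hple : p.length ≤ q.length := hpq.length_le
        have h1 : (c :: t).drop q.length <:+ (c :: t).drop p.length := by
          rw [show (c :: t).drop q.length = ((c :: t).drop p.length).drop (q.length - p.length) from by
            rw [List.drop_drop]; congr 1; omega]
          exact List.drop_suffix _ _
        have h2 : gCount q ((c :: t).drop q.length) ≤ gCount q ((c :: t).drop p.length) :=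
          gCount_suffix_le q hq h1
        have hlt : ((c :: t).drop p.length).length < (c :: t).length := by
          simp only [List.length_drop, List.length_cons]; omega
        have h3 := ih _ (hs ▸ hlt) _ rfl
        omega
      · rw [gCount_neg q hqpre]
        have h1 := ih t.length (by simp [← hs]) t rfl
        by_cases hppre : p.isPrefixOf (c :: t) = true
        · rw [gCount_pos p hp hppre]
          have hstep : (c :: t).drop p.length = t.drop (p.length - 1) := by
            rw [show p.length = (p.length - 1) + 1 from by omega]; simp
          have h2 := gCount_drop_le p hp t (j := p.length - 1) (by omega)
          rw [hstep]
          omega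
        · rw [gCount_neg p hppre]
          exact h1

-- per-window equivalence, stated over the chunk's character list:
-- A's inner size loop succeeds iff the window is long enough and the size-40 prefix repeats 3×
theorem chunk_equiv (c : List Char) :
    ((PySem.List.pyRange 40 (min (PySem.Int.floordiv ((c.length : Int)) 3) 80) 1).any
       (fun size => decide (3 ≤ PySem.Chars.count c (PySem.List.slice c none (some size)))))
    = (decide ((123 : Int) ≤ (c.length : Int)) &&
        decide (3 ≤ PySem.Chars.count c (PySem.List.slice c none (some 40)))) := by
  have hfd : PySem.Int.floordiv ((c.length : Int)) 3 = ((c.length / 3 : Nat) : Int) := by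
    simp [PySem.Int.floordiv, Int.fdiv_eq_ediv]
  rw [Bool.eq_iff_iff]
  simp only [List.any_eq_true, Bool.and_eq_true, decide_eq_true_eq]
  constructor
  · rintro ⟨size, hmem, hcnt⟩
    obtain ⟨h40, hlt, -⟩ := (PySem.List.mem_pyRange_iff_of_pos (by norm_num) size).mp hmem
    rw [hfd, lt_min_iff] at hlt
    have hL : 123 ≤ c.length := by omega
    refine ⟨by exact_mod_cast hL, ?_⟩
    have hsz : size.toNat = size := Int.toNat_of_nonneg (by omega)
    have hslice : PySem.List.slice c none (some size) = c.take size.toNat :=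
      PySem.List.slice_to c (by omega)
    have hslice40 : PySem.List.slice c none (some 40) = c.take 40 := by
      simpa using PySem.List.slice_to c (b := 40) (by norm_num)
    have hpre : c.take 40 <+: c.take size.toNat := by
      rw [show c.take 40 = (c.take size.toNat).take 40 from by
        rw [List.take_take]; congr 1; omega]
      exact List.take_prefix _ _
    have hne : c.take 40 ≠ [] := by
      intro h
      have : (c.take 40).length = 0 := by simp [h]
      simp only [List.length_take] at this
      omega
    have hqne : c.take size.toNat ≠ [] := by
      intro h
      rw [h] at hpre
      exact hne (List.prefix_nil.mp hpre)
    rw [hslice, count_eq_gCount c _ hqne] at hcnt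
    rw [hslice40, count_eq_gCount c _ hne]
    exact le_trans hcnt (gCount_mono _ _ hne hpre c.length c rfl)
  · rintro ⟨hL, hcnt⟩
    refine ⟨40, ?_, hcnt⟩
    refine (PySem.List.mem_pyRange_iff_of_pos (by norm_num) 40).mpr ⟨by norm_num, ?_, one_dvd _⟩
    rw [hfd, lt_min_iff]
    constructor
    · have : 123 ≤ c.length := by exact_mod_cast hL
      have : 41 ≤ c.length / 3 := by omega
      exact_mod_cast by omega
    · norm_num

-- cons form of range(a, b, 200)
theorem pyRange200_cons (a b : Int) (h : a < b) :
    PySem.List.pyRange a b 200 = a :: PySem.List.pyRange (a + 200) b 200 := by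
  rw [PySem.List.pyRange_of_pos _ _ (by norm_num : (0:Int) < 200),
      PySem.List.pyRange_of_pos _ _ (by norm_num : (0:Int) < 200)]
  by_cases h2 : a + 200 < b
  · rw [if_pos h, if_pos h2]
    have hN : ((b - a + 200 - 1) / 200).toNat = ((b - (a + 200) + 200 - 1) / 200).toNat + 1 := by
      omega
    rw [hN, List.range_succ_eq_map]
    simp only [List.map_cons, List.map_map, Nat.cast_zero, mul_zero, add_zero]
    congr 1
    refine List.map_congr_left fun k _ => ?_
    simp only [Function.comp_apply]
    push_cast
    ring
  · rw [if_pos h, if_neg h2]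
    have hN : ((b - a + 200 - 1) / 200).toNat = 1 := by omega
    rw [hN]
    simp

theorem pyRange200_nil (a b : Int) (h : ¬ a < b) :
    PySem.List.pyRange a b 200 = [] := by
  rw [PySem.List.pyRange_of_pos _ _ (by norm_num : (0:Int) < 200), if_neg h]
  simp

-- the while loop of B equals 'any' over the sampled window starts (given enough fuel)
theorem bWindowLoop_eq_any (text : String) (limit : Int) :
    ∀ (fuel : Nat) (start : Int), limit - start ≤ 200 * fuel →
      bWindowLoop text limit fuel start =
        (PySem.List.pyRange start limit 200).any (fun s =>
          let chunk := PySem.Str.slice text (some s) (some (s + 200))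
          decide (3 ≤ PySem.Str.count chunk (PySem.Str.slice chunk none (some 40)))) := by
  intro fuel
  induction fuel with
  | zero =>
    intro start hle
    have h : ¬ start < limit := by omega
    rw [bWindowLoop, pyRange200_nil _ _ h]
    simp
  | succ f ih =>
    intro start hle
    by_cases h : start < limit
    · rw [bWindowLoop, if_pos h, pyRange200_cons _ _ h, List.any_cons,
          ih (start + 200) (by push_cast at hle ⊢; omega)]
      simp
    · rw [bWindowLoop, if_neg h, pyRange200_nil _ _ h]
      simp

-- A's whole scan, rewritten window by window via chunk_equiv
theorem A_eq_guarded_any (text : String) (h : ¬ PySem.Str.len text < 120) :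
    is_degenerate_py text =
      (PySem.List.pyRange 0 (min (PySem.Str.len text - 120) 5000) 200).any (fun s =>
        let chunk := PySem.Str.slice text (some s) (some (s + 200))
        decide ((123:Int) ≤ PySem.Str.len chunk) &&
          decide (3 ≤ PySem.Str.count chunk (PySem.Str.slice chunk none (some 40)))) := by
  unfold is_degenerate_py
  rw [if_neg h]
  congr 1
  funext s
  simp only [PySem.Str.count_eq, PySem.Str.toList_slice, PySem.Chars.slice_eq_listSlice,
    PySem.Str.len_eq]
  exact chunk_equiv _

-- per-window bridge: the slice-form count test of the ports on window k is exactly pvHit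
theorem hit_iff (l : List Char) (k : Nat) :
    3 ≤ PySem.Chars.count ((l.drop (200 * k)).take 200)
        (PySem.List.slice ((l.drop (200 * k)).take 200) none (some 40))
      ↔ pvHit (l.drop (200 * k)) := by
  rw [show PySem.List.slice ((l.drop (200 * k)).take 200) none (some 40)
      = ((l.drop (200 * k)).take 200).take 40 from by
    simpa using PySem.List.slice_to ((l.drop (200 * k)).take 200) (b := 40) (by norm_num)]
  rw [List.take_take, show min 40 200 = 40 from by norm_num]

-- ================= windows of the scan, as drop/take on the character list =================

theorem chunk_list (l : List Char) (k : Nat) :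
    PySem.List.slice l (some ((200 * k : Nat) : Int)) (some (((200 * k : Nat) : Int) + 200))
      = (l.drop (200 * k)).take 200 := by
  simpa using PySem.List.slice_natCast_add (xs := l) (j := 200 * k) (n := 200)

theorem limit_cast (n : Nat) (hn : 120 ≤ n) :
    ((min (n - 120) 5000 : Nat) : Int) = min ((n : Int) - 120) 5000 := by
  rw [Nat.cast_min, Nat.cast_sub (by omega)]
  norm_num

theorem window_mem (text : String) (hn : 120 ≤ text.toList.length) (k : Nat)
    (hk : 200 * k < min (text.toList.length - 120) 5000) :
    ((200 * k : Nat) : Int) ∈ PySem.List.pyRange 0 (min (PySem.Str.len text - 120) 5000) 200 := by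
  refine (PySem.List.mem_pyRange_iff_of_pos (by norm_num) _).mpr ⟨Int.natCast_nonneg _, ?_, ?_⟩
  · rw [PySem.Str.len_eq, ← limit_cast _ hn]
    exact_mod_cast hk
  · exact ⟨(k : Int), by push_cast; ring⟩

theorem window_facts (text : String) (hn : 120 ≤ text.toList.length) (s : Int)
    (hs : s ∈ PySem.List.pyRange 0 (min (PySem.Str.len text - 120) 5000) 200) :
    ∃ k : Nat, k < 25 ∧ s = ((200 * k : Nat) : Int) ∧
      200 * k < min (text.toList.length - 120) 5000 := by
  obtain ⟨h0, hlt, m, hm⟩ := (PySem.List.mem_pyRange_iff_of_pos (by norm_num) s).mp hs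
  rw [PySem.Str.len_eq, ← limit_cast _ hn] at hlt
  have hM : min (text.toList.length - 120) 5000 ≤ 5000 := Nat.min_le_right _ _
  exact ⟨m.toNat, by omega, by omega, by omega⟩

-- converting one window's Str-level count test to the list level
theorem cnt_toList (text : String) (k : Nat) :
    (3 ≤ PySem.Str.count (PySem.Str.slice text (some ((200 * k : Nat) : Int)) (some (((200 * k : Nat) : Int) + 200)))
        (PySem.Str.slice (PySem.Str.slice text (some ((200 * k : Nat) : Int)) (some (((200 * k : Nat) : Int) + 200))) none (some 40)))
      ↔ 3 ≤ PySem.Chars.count ((text.toList.drop (200 * k)).take 200)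
          (PySem.List.slice ((text.toList.drop (200 * k)).take 200) none (some 40)) := by
  simp only [PySem.Str.count_eq, PySem.Str.toList_slice, PySem.Chars.slice_eq_listSlice,
    chunk_list]

theorem len_toList (text : String) (k : Nat) :
    PySem.Str.len (PySem.Str.slice text (some ((200 * k : Nat) : Int)) (some (((200 * k : Nat) : Int) + 200)))
      = ((((text.toList.drop (200 * k)).take 200).length : Nat) : Int) := by
  simp only [PySem.Str.len_eq, PySem.Str.toList_slice, PySem.Chars.slice_eq_listSlice, chunk_list]

theorem wlen_eq (l : List Char) (k : Nat) :
    ((l.drop (200 * k)).take 200).length = min 200 (l.length - 200 * k) := by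
  simp [List.length_take, List.length_drop]

-- ===== VERDICT (by name: the statement is the Claim_ definition above) =====
theorem is_degenerate_py_spec : Claim_unchanged_is_degenerate_py := by
  intro text _ hnd
  by_cases h : PySem.Str.len text < 120
  · unfold is_degenerate_py is_degenerate_py_alt
    rw [if_pos h, if_pos h]
  · have hn : 120 ≤ text.toList.length := by
      simp only [PySem.Str.len_eq] at h; omega
    have hB : is_degenerate_py_alt text =
        (PySem.List.pyRange 0 (min (PySem.Str.len text - 120) 5000) 200).any (fun s =>
          let chunk := PySem.Str.slice text (some s) (some (s + 200))
          decide (3 ≤ PySem.Str.count chunk (PySem.Str.slice chunk none (some 40)))) := by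
      unfold is_degenerate_py_alt
      rw [if_neg h]
      exact bWindowLoop_eq_any text _ _ 0 (by omega)
    rw [A_eq_guarded_any text h, hB, Bool.eq_iff_iff]
    simp only [List.any_eq_true, Bool.and_eq_true, decide_eq_true_eq]
    constructor
    · rintro ⟨s, hs, -, hc3⟩
      exact ⟨s, hs, hc3⟩
    · rintro ⟨s, hs, hc3⟩
      by_contra hA
      push Not at hA
      apply hnd
      obtain ⟨k, hk25, rfl, hklim⟩ := window_facts text hn s hs
      have hrep : pvHit (text.toList.drop (200 * k)) :=
        (hit_iff text.toList k).mp ((cnt_toList text k).mp hc3)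
      have hshort : ((text.toList.drop (200 * k)).take 200).length < 123 := by
        have hAs := hA _ hs
        rw [len_toList] at hAs
        by_contra hge
        have hge' : (123 : Int) ≤ (((text.toList.drop (200 * k)).take 200).length : Nat) := by
          omega
        have := hAs hge'
        omega
      rw [wlen_eq] at hshort
      have hm1 : min (text.toList.length - 120) 5000 ≤ text.toList.length - 120 :=
        Nat.min_le_left _ _
      have hm2 : min (text.toList.length - 120) 5000 ≤ 5000 := Nat.min_le_right _ _
      have hkq : k = text.toList.length / 200 := by omega
      refine ⟨by simp only [List.mem_cons, List.not_mem_nil, or_false]; omega, by omega, ?_⟩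
      intro k' hk'
      constructor
      · intro hrep'
        by_contra hne
        have hk'K : k' < text.toList.length / 200 := lt_of_le_of_ne hk' hne
        have hk'lim : 200 * k' < min (text.toList.length - 120) 5000 :=
          lt_min_iff.mpr ⟨by omega, by omega⟩
        have hc3' := (cnt_toList text k').mpr ((hit_iff text.toList k').mpr hrep')
        have hAs' := hA _ (window_mem text hn k' hk'lim)
        rw [len_toList] at hAs'
        have h123' : (123 : Int) ≤ (((text.toList.drop (200 * k')).take 200).length : Nat) := by
          rw [wlen_eq]
          have : 123 ≤ min 200 (text.toList.length - 200 * k') := le_min_iff.mpr ⟨by omega, by omega⟩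
          exact_mod_cast this
        have := hAs' h123'
        omega
      · intro hk'eq
        rw [hk'eq, ← hkq]
        exact hrep

set_option maxRecDepth 40000 in
set_option maxHeartbeats 2000000 in
theorem is_degenerate_py_changed : Claim_changed_is_degenerate_py := by
  unfold Claim_changed_is_degenerate_py; decide

theorem is_degenerate_py_tight : Claim_exact_is_degenerate_py := by
  intro text _ hd
  obtain ⟨h1, h3, hiff⟩ := hd
  have h2 : text.toList.length % 200 = 121 ∨ text.toList.length % 200 = 122 := by
    simpa using h1
  have hn : 120 ≤ text.toList.length := by omega
  have h : ¬ PySem.Str.len text < 120 := by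
    simp only [PySem.Str.len_eq]; omega
  have hKlim : 200 * (text.toList.length / 200) < min (text.toList.length - 120) 5000 :=
    lt_min_iff.mpr ⟨by omega, by omega⟩
  have hB : is_degenerate_py_alt text =
      (PySem.List.pyRange 0 (min (PySem.Str.len text - 120) 5000) 200).any (fun s =>
        let chunk := PySem.Str.slice text (some s) (some (s + 200))
        decide (3 ≤ PySem.Str.count chunk (PySem.Str.slice chunk none (some 40)))) := by
    unfold is_degenerate_py_alt
    rw [if_neg h]
    exact bWindowLoop_eq_any text _ _ 0 (by omega)
  have hAf : is_degenerate_py text = false := by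
    rw [A_eq_guarded_any text h, List.any_eq_false]
    intro s hs
    simp only [Bool.and_eq_true, decide_eq_true_eq, not_and]
    intro h123 hc3
    obtain ⟨k, hk25, rfl, hklim⟩ := window_facts text hn s hs
    have hrep : pvHit (text.toList.drop (200 * k)) :=
      (hit_iff text.toList k).mp ((cnt_toList text k).mp hc3)
    rw [len_toList] at h123
    have h123' : 123 ≤ ((text.toList.drop (200 * k)).take 200).length := by omega
    rw [wlen_eq] at h123'
    have h123'' := (le_min_iff.mp h123').2
    have hm1 : min (text.toList.length - 120) 5000 ≤ text.toList.length - 120 :=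
      Nat.min_le_left _ _
    have hkK : k < text.toList.length / 200 := by omega
    have := (hiff k hkK.le).mp hrep
    omega
  have hBt : is_degenerate_py_alt text = true := by
    rw [hB, List.any_eq_true]
    refine ⟨((200 * (text.toList.length / 200) : Nat) : Int),
      window_mem text hn _ hKlim, ?_⟩
    simp only [decide_eq_true_eq]
    exact (cnt_toList text _).mpr ((hit_iff text.toList _).mpr ((hiff _ le_rfl).mpr rfl))
  rw [hAf, hBt]
  decide
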